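-- pv_equiv track=rewrite | github.com/pypi-data/pypi-mirror-116 | packages/convo-new-version-abdo/convo_new_version_abdo-1.0.2-py3-none-any.whl/convo/core/training/interactive.py | _split_conversation_at_resume
-- ===== SOURCE A (Python) =====
-- from typing import Any, Callable, Dict, List, Optional, Text, Tuple, Union, Set
--
-- def _split_conversation_at_resume(
--     events: List[Dict[Text, Any]]
-- ) -> List[List[Dict[Text, Any]]]:
--     """Split a conversation at Restarted events.
--
--     Returns an array of event lists, without the Restarted events."""
--
--     sub_chats = []
--     present = []
--     for e in events:
--         if e.get("event") == "restart":
--             if present: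
--                 sub_chats.append(present)
--             present = []
--         else:
--             present.append(e)
--
--     if present:
--         sub_chats.append(present)
--
--     return sub_chats
-- ===== SOURCE B (Python) =====
-- from itertools import groupby
-- from typing import Any, Dict, List, Text
--
--
-- def _split_conversation_at_resume(
--     events: List[Dict[Text, Any]]
-- ) -> List[List[Dict[Text, Any]]]:
--     """Split a conversation at Restarted events.
--
--     Returns an array of event lists, without the Restarted events."""
--     return [
--         list(group)
--         for is_restart, group in groupby(events, key=lambda e: e.get("event") == "restart")
--         if not is_restart
--     ]
-- ===== Notes on version B (the rewrite author's own statement) =====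
-- stated objective: idiomatic
-- what changed: Replaces the explicit accumulator/flush loop with itertools.groupby keyed on is-restart, keeping only the non-restart runs; groupby's non-emission of empty groups reproduces the empty-group suppression automatically.
import Mathlib
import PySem

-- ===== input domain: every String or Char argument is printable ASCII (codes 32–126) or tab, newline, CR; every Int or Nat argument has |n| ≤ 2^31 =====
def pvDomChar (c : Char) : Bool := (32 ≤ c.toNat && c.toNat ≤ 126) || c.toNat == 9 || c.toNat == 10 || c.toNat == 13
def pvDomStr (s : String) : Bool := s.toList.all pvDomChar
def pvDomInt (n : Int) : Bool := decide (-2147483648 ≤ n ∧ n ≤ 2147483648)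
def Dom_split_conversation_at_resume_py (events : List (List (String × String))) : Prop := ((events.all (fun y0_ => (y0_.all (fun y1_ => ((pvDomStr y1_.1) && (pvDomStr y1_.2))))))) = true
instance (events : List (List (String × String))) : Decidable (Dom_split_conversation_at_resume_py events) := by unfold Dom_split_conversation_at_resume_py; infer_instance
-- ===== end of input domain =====

-- B replaces A's explicit accumulator/flush loop by grouping consecutive runs keyed on
-- "is a restart event" and keeping the non-restart runs (itertools.groupby style); objective: idiomatic.

-- ===== PORT A =====
-- A: one pass with state (sub_chats, present); a restart flushes a non-empty `present`.
def split_conversation_at_resume_py (events : List (List (String × String))) : List (List (List (String × String))) :=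
  let st := events.foldl
    (fun (st : List (List (List (String × String))) × List (List (String × String))) e =>
      if PySem.Dict.get? (PySem.Dict.mk e) "event" == some "restart" then
        (if st.2 ≠ [] then (st.1 ++ [st.2], ([] : List (List (String × String)))) else (st.1, []))
      else
        (st.1, st.2 ++ [e]))
    ([], [])
  if st.2 ≠ [] then st.1 ++ [st.2] else st.1

-- ===== PORT B =====
-- B-side helper: groupby(events, key): runs of consecutive elements with equal key.
def pvGroupRuns (events : List (List (String × String))) :
    List (Bool × List (List (String × String))) :=
  match events with
  | [] => []
  | e :: es =>
    let k := PySem.Dict.get? (PySem.Dict.mk e) "event" == some "restart"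
    match pvGroupRuns es with
    | [] => [(k, [e])]
    | (k', g) :: rest => if k = k' then (k, e :: g) :: rest else (k, [e]) :: (k', g) :: rest

def split_conversation_at_resume_py_alt (events : List (List (String × String))) : List (List (List (String × String))) :=
  ((pvGroupRuns events).filter (fun p => !p.1)).map (fun p => p.2)

-- ===== PRECONDITION & SPEC =====
def Spec_split_conversation_at_resume_py (events : List (List (String × String))) (out : List (List (List (String × String)))) : Prop := out = split_conversation_at_resume_py_alt events
instance (events : List (List (String × String))) (out : List (List (List (String × String)))) : Decidable (Spec_split_conversation_at_resume_py events out) := by unfold Spec_split_conversation_at_resume_py; infer_instance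

-- ===== CLAIM (what is proved, stated in full; the proofs are below) =====
def Claim_equal_split_conversation_at_resume_py : Prop := ∀ (events : List (List (String × String))), Dom_split_conversation_at_resume_py events → Spec_split_conversation_at_resume_py events (split_conversation_at_resume_py events)

-- ===== LEMMAS AND PROOFS =====

-- proof-only names for A's loop body and final flush (definitionally equal to the port's lambdas)
def pvStep (st : List (List (List (String × String))) × List (List (String × String)))
    (e : List (String × String)) :
    List (List (List (String × String))) × List (List (String × String)) :=
  if PySem.Dict.get? (PySem.Dict.mk e) "event" == some "restart" then
    (if st.2 ≠ [] then (st.1 ++ [st.2], ([] : List (List (String × String)))) else (st.1, []))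
  else
    (st.1, st.2 ++ [e])

def pvFlush (st : List (List (List (String × String))) × List (List (String × String))) :
    List (List (List (String × String))) :=
  if st.2 ≠ [] then st.1 ++ [st.2] else st.1

-- the accumulator-free core of A's loop: `present` is the current group
def pvCore (present : List (List (String × String))) (events : List (List (String × String))) :
    List (List (List (String × String))) :=
  match events with
  | [] => if present ≠ [] then [present] else []
  | e :: es =>
    if PySem.Dict.get? (PySem.Dict.mk e) "event" == some "restart" then
      (if present ≠ [] then [present] else []) ++ pvCore [] es
    else
      pvCore (present ++ [e]) es

-- A's foldl started from (subs, present) produces subs ++ pvCore present events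
theorem pvFoldlA (events : List (List (String × String)))
    (subs : List (List (List (String × String)))) (present : List (List (String × String))) :
    pvFlush (events.foldl pvStep (subs, present)) = subs ++ pvCore present events := by
  induction events generalizing subs present with
  | nil => simp only [List.foldl_nil, pvCore, pvFlush]; split_ifs <;> simp
  | cons e es ih =>
    simp only [List.foldl_cons, pvCore, pvStep]
    by_cases hk : (PySem.Dict.get? (PySem.Dict.mk e) "event" == some "restart") = true
    · simp only [hk, if_true]
      split_ifs with hp <;> rw [ih] <;> simp
    · simp only [Bool.not_eq_true] at hk
      simp only [hk, Bool.false_eq_true, if_false]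
      exact ih subs (present ++ [e])

-- pvCore in terms of B's runs
theorem pvCoreRuns (events : List (List (String × String)))
    (present : List (List (String × String))) :
    pvCore present events =
      match pvGroupRuns events with
      | (false, g) :: rest =>
          (if present ≠ [] then present ++ g else g) ::
            ((rest.filter (fun p => !p.1)).map (fun p => p.2))
      | other =>
          (if present ≠ [] then [present] else []) ++
            ((other.filter (fun p => !p.1)).map (fun p => p.2)) := by
  induction events generalizing present with
  | nil => simp [pvCore, pvGroupRuns]
  | cons e es ih =>
    by_cases hk : (PySem.Dict.get? (PySem.Dict.mk e) "event" == some "restart") = true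
    · -- restart: the first run of e :: es has key true
      simp only [pvCore, hk, if_true]
      rw [ih []]
      simp only [ne_eq, not_true_eq_false, if_false, List.nil_append, pvGroupRuns, hk]
      rcases h : pvGroupRuns es with _ | ⟨⟨k', g⟩, rest⟩
      · simp
      · cases k' <;> simp
    · simp only [Bool.not_eq_true] at hk
      simp only [pvCore, hk, Bool.false_eq_true, if_false]
      rw [ih (present ++ [e])]
      simp only [pvGroupRuns, hk]
      rcases h : pvGroupRuns es with _ | ⟨⟨k', g⟩, rest⟩
      · split_ifs <;> simp_all
      · cases k' <;> split_ifs <;> simp_all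

-- ===== VERDICT (by name: the statement is the Claim_ definition above) =====
theorem split_conversation_at_resume_py_spec : Claim_equal_split_conversation_at_resume_py := by
  intro events _
  unfold Spec_split_conversation_at_resume_py split_conversation_at_resume_py_alt
  have hA : split_conversation_at_resume_py events =
      pvFlush (events.foldl pvStep ([], [])) := rfl
  rw [hA, pvFoldlA events [] [], pvCoreRuns events []]
  simp only [ne_eq, not_true_eq_false, if_false, List.nil_append]
  rcases h : pvGroupRuns events with _ | ⟨⟨k', g⟩, rest⟩
  · simp
  · cases k' <;> simp
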